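-- pv_equiv track=rewrite | github.com/BarisAtik/Natural-Computing-Project | scripts/headrpp_alg.py | loop_anneal
-- ===== SOURCE A (Python) =====
-- def loop_anneal(route):
--     visited = set()
--     new_route = []
--     for node in route:
--         if node not in visited:
--             visited.add(node)
--             new_route.append(node)
--         else:
--             index = new_route.index(node)
--             new_route = new_route[: index + 1]
--             visited = set(new_route)
--     return new_route
-- ===== SOURCE B (Python) =====
-- def loop_anneal(route):
--     seen = set()
--     out = []
--     for node in route:
--         if node in seen:
--             while out[-1] != node:
--                 seen.discard(out.pop())
--         else:
--             seen.add(node)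
--             out.append(node)
--     return out
-- ===== Notes on version B (the rewrite author's own statement) =====
-- stated objective: alternative
-- what changed: Instead of scanning new_route with .index, slicing it and rebuilding the visited set on every repeat, B pops the suffix element by element (discarding each popped node from the seen set) until the repeated node resurfaces.
import Mathlib
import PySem

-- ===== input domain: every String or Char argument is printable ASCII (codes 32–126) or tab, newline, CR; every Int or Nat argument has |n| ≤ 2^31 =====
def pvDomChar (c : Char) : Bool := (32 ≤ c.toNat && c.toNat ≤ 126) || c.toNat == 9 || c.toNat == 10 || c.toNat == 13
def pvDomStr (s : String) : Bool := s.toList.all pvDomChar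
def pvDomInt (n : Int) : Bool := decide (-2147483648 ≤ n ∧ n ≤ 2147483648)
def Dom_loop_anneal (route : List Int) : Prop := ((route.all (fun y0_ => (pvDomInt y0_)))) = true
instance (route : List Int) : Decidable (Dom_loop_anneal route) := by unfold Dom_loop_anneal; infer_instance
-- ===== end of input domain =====

-- B removes loops by popping the suffix node-by-node until the repeated node resurfaces,
-- instead of A's inner index-scan + slice + visited-set rebuild on every repeat.

-- ===== PORT A =====
-- one iteration of A's for-loop: state = (visited, new_route)
def pvStepA (st : PySem.Set Int × List Int) (node : Int) : PySem.Set Int × List Int :=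
  if st.1.contains node = false then
    (st.1.add node, st.2 ++ [node])
  else
    match PySem.List.index? st.2 node with
    | some i =>
        let nr := PySem.List.slice st.2 none (some ((i : Int) + 1))
        (PySem.Set.ofList nr, nr)
    | none => (st.1, st.2)   -- unreachable (node ∈ visited = set(new_route)); Python would raise ValueError

def loop_anneal (route : List Int) : List Int :=
  (route.foldl pvStepA (PySem.Set.empty, [])).2

-- ===== PORT B =====
-- B's inner while-loop: pop the last element while it differs from node
def pvPop (seen : PySem.Set Int) (out : List Int) (node : Int) : PySem.Set Int × List Int :=
  match h : PySem.List.pyGet? out (-1) with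
  | none => (seen, out)   -- unreachable (node ∈ seen = set(out), so out ≠ []); Python would raise IndexError
  | some x =>
    if x ≠ node then pvPop (seen.discard x) out.dropLast node
    else (seen, out)
termination_by out.length
decreasing_by
  cases out with
  | nil => simp [PySem.List.pyGet?, PySem.List.pyIdx?] at h
  | cons y ys => simp [List.length_dropLast]

-- one iteration of B's for-loop: state = (seen, out)
def pvStepB (st : PySem.Set Int × List Int) (node : Int) : PySem.Set Int × List Int :=
  if st.1.contains node then
    pvPop st.1 st.2 node
  else
    (st.1.add node, st.2 ++ [node])

def loop_anneal_alt (route : List Int) : List Int :=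
  (route.foldl pvStepB (PySem.Set.empty, [])).2

-- ===== PRECONDITION & SPEC =====
def Spec_loop_anneal (route : List Int) (out : List Int) : Prop := out = loop_anneal_alt route
instance (route : List Int) (out : List Int) : Decidable (Spec_loop_anneal route out) := by unfold Spec_loop_anneal; infer_instance

-- ===== CLAIM (what is proved, stated in full; the proofs are below) =====
def Claim_equal_loop_anneal : Prop := ∀ (route : List Int), Dom_loop_anneal route → Spec_loop_anneal route (loop_anneal route)

-- ===== LEMMAS AND PROOFS =====

-- B's while-loop pops exactly the part of out strictly after the (unique) occurrence of node
lemma pvPop_spec (node : Int) : ∀ (suf pre : List Int) (sB : PySem.Set Int),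
    (pre ++ node :: suf).Nodup →
    (∀ x : Int, x ∈ sB ↔ x ∈ pre ++ node :: suf) →
    ∃ s', pvPop sB (pre ++ node :: suf) node = (s', pre ++ [node]) ∧
      ∀ x : Int, x ∈ s' ↔ x ∈ pre ++ [node] := by
  intro suf
  induction suf using List.reverseRecOn with
  | nil =>
      intro pre sB _ hs
      refine ⟨sB, ?_, hs⟩
      rw [pvPop]
      split
      · rename_i h
        rw [PySem.List.pyGet?_neg_one_append_singleton] at h
      · rename_i x h
        rw [PySem.List.pyGet?_neg_one_append_singleton] at h
        simp only [Option.some.injEq] at h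
        simp [h]
  | append_singleton t a ih =>
      intro pre sB hnd hs
      have hre : pre ++ node :: (t ++ [a]) = (pre ++ node :: t) ++ [a] := by simp
      have hnd' : ((pre ++ node :: t) ++ [a]).Nodup := by rw [← hre]; exact hnd
      have ha : a ∉ pre ++ node :: t := by
        intro hx
        exact List.disjoint_of_nodup_append hnd' hx (by simp)
      have hane : a ≠ node := by
        intro he; exact ha (by simp [he])
      obtain ⟨s', h1, h2⟩ := ih pre (sB.discard a)
        (List.Nodup.sublist (List.sublist_append_left _ _) hnd')
        (by
          intro x
          rw [PySem.Set.mem_discard]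
          constructor
          · rintro ⟨hx, hxa⟩
            have := (hs x).mp hx
            rw [hre] at this
            rcases List.mem_append.mp this with h | h
            · exact h
            · simp at h; exact absurd h hxa
          · intro hx
            refine ⟨(hs x).mpr ?_, ?_⟩
            · rw [hre]; exact List.mem_append_left _ hx
            · intro he; exact ha (he ▸ hx))
      refine ⟨s', ?_, h2⟩
      rw [hre, pvPop]
      split
      · rename_i h
        rw [PySem.List.pyGet?_neg_one_append_singleton] at h
        exact absurd h (by simp)
      · rename_i x h
        rw [PySem.List.pyGet?_neg_one_append_singleton] at h
        simp only [Option.some.injEq] at h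
        subst h
        rw [if_pos hane, List.dropLast_concat]
        exact h1

-- the main loop invariant: with the same new_route and equal visited/seen (as sets),
-- both folds produce the same new_route
lemma pvMain (route : List Int) : ∀ (sA sB : PySem.Set Int) (acc : List Int),
    acc.Nodup →
    (∀ x : Int, x ∈ sA ↔ x ∈ acc) →
    (∀ x : Int, x ∈ sB ↔ x ∈ acc) →
    (route.foldl pvStepA (sA, acc)).2 = (route.foldl pvStepB (sB, acc)).2 := by
  induction route with
  | nil => intro _ _ _ _ _ _; rfl
  | cons node rest ih =>
      intro sA sB acc hnd hA hB
      by_cases hm : node ∈ acc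
      · -- repeat: both truncate to pre ++ [node]
        obtain ⟨pre, suf, rfl⟩ := List.append_of_mem hm
        have hmA : node ∈ sA := (hA node).mpr hm
        have hmB : node ∈ sB := (hB node).mpr hm
        have hnp : node ∉ pre := by
          have := List.disjoint_of_nodup_append hnd
          intro hx; exact this hx (by simp)
        have hidx : PySem.List.index? (pre ++ node :: suf) node = some pre.length := by
          rw [PySem.List.index?_eq_some_iff]
          exact ⟨pre, suf, rfl, rfl, hnp⟩
        have hslice : PySem.List.slice (pre ++ node :: suf) none (some ((pre.length : Int) + 1))
            = pre ++ [node] := by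
          have h0 : (0:Int) ≤ (pre.length : Int) + 1 := by positivity
          rw [PySem.List.slice_to _ h0]
          have : ((pre.length : Int) + 1).toNat = pre.length + 1 := by omega
          rw [this, List.take_append]
          simp
        obtain ⟨s', hpop, hs'⟩ := pvPop_spec node suf pre sB hnd hB
        have hnd' : (pre ++ [node]).Nodup :=
          List.Nodup.sublist
            ((List.cons_sublist_cons.mpr (List.nil_sublist suf)).append_left pre) hnd
        have hidx' : List.idxOf? node (pre ++ node :: suf) = some pre.length := by
          rw [← PySem.List.index?_eq_idxOf?]; exact hidx
        have hstepA : pvStepA (sA, pre ++ node :: suf) node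
            = (PySem.Set.ofList (pre ++ [node]), pre ++ [node]) := by
          simp [pvStepA, hmA, hidx', hslice]
        have hstepB : pvStepB (sB, pre ++ node :: suf) node = (s', pre ++ [node]) := by
          simp [pvStepB, hmB, hpop]
        simp only [List.foldl_cons, hstepA, hstepB]
        exact ih _ s' (pre ++ [node]) hnd'
          (fun x => by rw [PySem.Set.mem_ofList]) hs'
      · -- fresh node: both append
        have hnA : node ∉ sA := fun hx => hm ((hA node).mp hx)
        have hnB : node ∉ sB := fun hx => hm ((hB node).mp hx)
        have hnd' : (acc ++ [node]).Nodup :=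
          hnd.append (List.nodup_singleton node)
            (fun a ha hb => hm ((List.mem_singleton.mp hb) ▸ ha))
        have hstepA : pvStepA (sA, acc) node = (sA.add node, acc ++ [node]) := by
          simp [pvStepA, hnA]
        have hstepB : pvStepB (sB, acc) node = (sB.add node, acc ++ [node]) := by
          simp [pvStepB, hnB]
        simp only [List.foldl_cons, hstepA, hstepB]
        exact ih _ _ (acc ++ [node]) hnd'
          (fun x => by rw [PySem.Set.mem_add, List.mem_append, List.mem_singleton, hA x])
          (fun x => by rw [PySem.Set.mem_add, List.mem_append, List.mem_singleton, hB x])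

-- ===== VERDICT (by name: the statement is the Claim_ definition above) =====
theorem loop_anneal_spec : Claim_equal_loop_anneal := by
  intro route _
  unfold Spec_loop_anneal loop_anneal loop_anneal_alt
  exact pvMain route PySem.Set.empty PySem.Set.empty [] (by simp)
    (fun x => by simp [PySem.Set.empty]) (fun x => by simp [PySem.Set.empty])
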